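-- pv_equiv track=rewrite | github.com/Mkm8961/harmonization | app.py | validate_valve
-- ===== SOURCE A (Python) =====
-- def validate_valve(parts):
--     return (
--         parts[0] == "VALVE" and
--         any(x in parts for x in ["BALL", "GATE", "CHECK", "PLUG"]) and
--         any(p.isdigit() or '"' in p for p in parts) and
--         any(x in parts for x in ["150A", "300A", "600A"]) and
--         any(x in parts for x in ["FE RF", "FLANGED", "THRD"]) and
--         any(x in parts for x in ["FP", "FULL PORT"]) and
--         any(p for p in parts if len(p) > 4 and p.isalnum())
--     )
-- ===== SOURCE B (Python) =====
-- def validate_valve(parts):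
--     if parts[0] != "VALVE":
--         return False
--     typ = dq = sz = cn = pt = la = False
--     for p in parts:
--         if p in ("BALL", "GATE", "CHECK", "PLUG"):
--             typ = True
--         if p.isdigit() or '"' in p:
--             dq = True
--         if p in ("150A", "300A", "600A"):
--             sz = True
--         if p in ("FE RF", "FLANGED", "THRD"):
--             cn = True
--         if p in ("FP", "FULL PORT"):
--             pt = True
--         if len(p) > 4 and p.isalnum():
--             la = True
--     return typ and dq and sz and cn and pt and la
-- ===== Notes on version B (the rewrite author's own statement) =====
-- stated objective: alternative
-- what changed: Replaces A's six separate any(...) scans over parts with a single pass that accumulates six boolean flags (guarding on parts[0] first), returning their conjunction.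
import Mathlib
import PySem

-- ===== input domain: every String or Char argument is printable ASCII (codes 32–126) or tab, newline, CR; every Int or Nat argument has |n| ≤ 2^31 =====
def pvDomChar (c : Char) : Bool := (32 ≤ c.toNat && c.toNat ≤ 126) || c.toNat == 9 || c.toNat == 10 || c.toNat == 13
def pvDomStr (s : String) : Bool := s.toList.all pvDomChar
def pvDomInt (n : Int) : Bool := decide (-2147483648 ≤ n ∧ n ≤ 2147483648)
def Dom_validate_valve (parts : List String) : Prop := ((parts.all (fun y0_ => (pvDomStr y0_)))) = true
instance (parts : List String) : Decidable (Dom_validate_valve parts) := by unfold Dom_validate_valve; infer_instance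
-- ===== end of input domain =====

-- B replaces A's six separate any(...) scans with one accumulating pass over parts (alternative decomposition, same cost class).

-- ===== PORT A =====
-- A: parts[0] == "VALVE" and six any(...) scans.  The last clause tests the
-- truthiness of p for p with len(p) > 4, which is always truthy (nonempty), so
-- it is exactly "some p has len > 4 and is alnum".
def validate_valve (parts : List String) : Bool :=
  (PySem.List.pyGet? parts 0 == some "VALVE") &&
  (["BALL", "GATE", "CHECK", "PLUG"].any (fun x => parts.contains x)) &&
  (parts.any (fun p => PySem.Str.strIsdigit p || PySem.Str.isIn "\"" p)) &&
  (["150A", "300A", "600A"].any (fun x => parts.contains x)) &&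
  (["FE RF", "FLANGED", "THRD"].any (fun x => parts.contains x)) &&
  (["FP", "FULL PORT"].any (fun x => parts.contains x)) &&
  (parts.any (fun p => decide (4 < PySem.Str.len p) && PySem.Str.strIsalnum p))

-- ===== PORT B =====
-- one step of B's loop over the six flags
def pvStep (acc : Bool × Bool × Bool × Bool × Bool × Bool) (p : String) :
    Bool × Bool × Bool × Bool × Bool × Bool :=
  (acc.1 || (p == "BALL" || p == "GATE" || p == "CHECK" || p == "PLUG"),
   acc.2.1 || (PySem.Str.strIsdigit p || PySem.Str.isIn "\"" p),
   acc.2.2.1 || (p == "150A" || p == "300A" || p == "600A"),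
   acc.2.2.2.1 || (p == "FE RF" || p == "FLANGED" || p == "THRD"),
   acc.2.2.2.2.1 || (p == "FP" || p == "FULL PORT"),
   acc.2.2.2.2.2 || (decide (4 < PySem.Str.len p) && PySem.Str.strIsalnum p))

def validate_valve_alt (parts : List String) : Bool :=
  if PySem.List.pyGet? parts 0 != some "VALVE" then false
  else
    let r := parts.foldl pvStep (false, false, false, false, false, false)
    r.1 && r.2.1 && r.2.2.1 && r.2.2.2.1 && r.2.2.2.2.1 && r.2.2.2.2.2

-- ===== PRECONDITION & SPEC =====
-- Pre_ excludes only the empty list, on which Python's parts[0] raises IndexError.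
def Pre_validate_valve (parts : List String) : Prop := parts ≠ []
instance (parts : List String) : Decidable (Pre_validate_valve parts) := by unfold Pre_validate_valve; infer_instance
def pvWitness_validate_valve : List String := (["VALVE"])

def Spec_validate_valve (parts : List String) (out : Bool) : Prop := out = validate_valve_alt parts
instance (parts : List String) (out : Bool) : Decidable (Spec_validate_valve parts out) := by unfold Spec_validate_valve; infer_instance

-- ===== CLAIM (what is proved, stated in full; the proofs are below) =====
def Claim_equal_validate_valve : Prop := ∀ (parts : List String), Dom_validate_valve parts → Pre_validate_valve parts → Spec_validate_valve parts (validate_valve parts)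

-- ===== LEMMAS AND PROOFS =====

-- the fold computes, in each component, "initial flag OR some element satisfies the test"
theorem pvFold_eq (parts : List String) (a b c d e f : Bool) :
    parts.foldl pvStep (a, b, c, d, e, f) =
      (a || parts.any (fun p => p == "BALL" || p == "GATE" || p == "CHECK" || p == "PLUG"),
       b || parts.any (fun p => PySem.Str.strIsdigit p || PySem.Str.isIn "\"" p),
       c || parts.any (fun p => p == "150A" || p == "300A" || p == "600A"),
       d || parts.any (fun p => p == "FE RF" || p == "FLANGED" || p == "THRD"),
       e || parts.any (fun p => p == "FP" || p == "FULL PORT"),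
       f || parts.any (fun p => decide (4 < PySem.Str.len p) && PySem.Str.strIsalnum p)) := by
  induction parts generalizing a b c d e f with
  | nil => simp
  | cons p t ih =>
      simp only [List.foldl_cons, List.any_cons, pvStep, ih]
      simp [Bool.or_assoc]

-- scanning the list of candidates with `contains` equals scanning parts with an equality disjunction
-- any distributes over a pointwise ||
theorem pvAnyOr {α : Type} (l : List α) (p q : α → Bool) :
    l.any (fun x => p x || q x) = (l.any p || l.any q) := by
  induction l with
  | nil => simp
  | cons a t ih =>
      simp only [List.any_cons, ih]
      cases p a <;> cases q a <;> simp

theorem pvAnyMem (parts : List String) (xs : List String) :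
    xs.any (fun x => parts.contains x) = parts.any (fun p => xs.any (fun x => p == x)) := by
  induction xs with
  | nil => simp
  | cons x t ih =>
      simp only [List.any_cons, ih, pvAnyOr]
      congr 1
      simp [List.any_beq, BEq.comm]

theorem validate_valve_spec : Claim_equal_validate_valve := by
  intro parts _ _
  unfold Spec_validate_valve validate_valve validate_valve_alt
  rw [pvFold_eq]
  by_cases h : PySem.List.pyGet? parts 0 = some "VALVE"
  · simp only [h, bne_self_eq_false, if_neg Bool.false_ne_true, BEq.refl, Bool.true_and,
      Bool.false_or]
    rw [pvAnyMem parts ["BALL", "GATE", "CHECK", "PLUG"],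
        pvAnyMem parts ["150A", "300A", "600A"],
        pvAnyMem parts ["FE RF", "FLANGED", "THRD"],
        pvAnyMem parts ["FP", "FULL PORT"]]
    simp [Bool.and_assoc, Bool.or_assoc]
  · simp [h, bne_iff_ne]
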